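-- pv_equiv track=rewrite | github.com/Mikosztyla/UniversityProgramms | Tests/ABC.py | increase_evens
-- ===== SOURCE A (Python) =====
-- import math
--
-- def increase_evens(x):
--     number = 0
--     l = int(math.log10(x))
--     for i in range(l, -1, -1):
--         number = number * 10 + x // (10 ** i)
--         x %= 10 ** i
--         if number % 2 == 0:
--             number += 1
--     return number
-- ===== SOURCE B (Python) =====
-- def increase_evens(x):
--     # Pre: x >= 1 (A raises ValueError via math.log10 for x <= 0).
--     # Two passes: extract the digits low-to-high, then rebuild high-to-low,
--     # nudging every even digit up by one.
--     digits = []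
--     while x > 0:
--         digits.append(x % 10)
--         x //= 10
--     result = 0
--     for d in reversed(digits):
--         result = result * 10 + d + (1 - d % 2)
--     return result
-- ===== Notes on version B (the rewrite author's own statement) =====
-- stated objective: alternative
-- what changed: Replaces the fused log10-driven high-to-low loop (which recomputes a power of ten and tests the accumulator's parity at every step) with two simple passes: extract the digits low-to-high by repeated divmod, then fold them back high-to-low, bumping each even digit arithmetically instead of branching on the accumulator's parity.
-- outside the precondition, e.g. on increase_evens(0): A raises ValueError, B returns 0; on increase_evens(-7): A raises ValueError, B returns 0
import Mathlib
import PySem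

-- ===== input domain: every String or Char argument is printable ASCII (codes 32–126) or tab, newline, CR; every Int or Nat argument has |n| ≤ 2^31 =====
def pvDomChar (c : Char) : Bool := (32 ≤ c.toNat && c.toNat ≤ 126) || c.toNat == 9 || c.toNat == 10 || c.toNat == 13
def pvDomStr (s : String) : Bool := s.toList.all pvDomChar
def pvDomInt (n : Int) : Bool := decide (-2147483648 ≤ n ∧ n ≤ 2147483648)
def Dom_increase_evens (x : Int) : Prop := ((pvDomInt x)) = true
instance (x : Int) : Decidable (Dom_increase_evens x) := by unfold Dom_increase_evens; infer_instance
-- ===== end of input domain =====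

-- B rebuilds the number from a digit list in two plain divmod-10 passes instead of A's
-- fused log10/10**i high-to-low loop (objective: alternative decomposition, same cost).

-- ===== PORT A =====
-- int(math.log10(x)) for 1 ≤ x ≤ 2^31: exact floor of log10 (the float is exact enough there);
-- x ≤ 0 raises ValueError in Python — excluded by Pre_.
def pvLog10 (n : Nat) : Nat :=
  if _h : n < 10 then 0 else pvLog10 (n / 10) + 1
termination_by n
decreasing_by exact Nat.div_lt_self (by omega) (by omega)

def increase_evens (x : Int) : Int :=
  let l := pvLog10 x.toNat
  ((PySem.List.pyRange (l : Int) (-1) (-1)).foldl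
      (fun (st : Int × Int) i =>
        let number := st.1 * 10 + PySem.Int.floordiv st.2 (10 ^ i.toNat)  -- 10 ** i, i ≥ 0 in this range
        let x' := PySem.Int.mod st.2 (10 ^ i.toNat)
        (if PySem.Int.mod number 2 = 0 then number + 1 else number, x'))
      (0, x)).1

-- ===== PORT B =====
-- while x > 0: digits.append(x % 10); x //= 10
def pvDigits (x : Int) : List Int :=
  if _h : 0 < x then PySem.Int.mod x 10 :: pvDigits (PySem.Int.floordiv x 10)
  else []
termination_by x.toNat
decreasing_by
  rw [PySem.Int.floordiv_eq_ediv_of_pos (by omega)]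
  omega

def increase_evens_alt (x : Int) : Int :=
  (pvDigits x).reverse.foldl (fun r d => r * 10 + d + (1 - PySem.Int.mod d 2)) 0

-- ===== PRECONDITION & SPEC =====
-- Pre_ excludes exactly x ≤ 0, on which A raises ValueError (math.log10 domain error).
def Pre_increase_evens (x : Int) : Prop := 1 ≤ x
instance (x : Int) : Decidable (Pre_increase_evens x) := by unfold Pre_increase_evens; infer_instance
def pvWitness_increase_evens : Int := 2040

def Spec_increase_evens (x : Int) (out : Int) : Prop := out = increase_evens_alt x
instance (x : Int) (out : Int) : Decidable (Spec_increase_evens x out) := by unfold Spec_increase_evens; infer_instance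

-- ===== CLAIM (what is proved, stated in full; the proofs are below) =====
def Claim_equal_increase_evens : Prop := ∀ (x : Int), Dom_increase_evens x → Pre_increase_evens x → Spec_increase_evens x (increase_evens x)

-- ===== LEMMAS AND PROOFS =====
-- A's step on the accumulator, written with Int.emod.
def stepA (n d : Int) : Int :=
  if (n * 10 + d) % 2 = 0 then n * 10 + d + 1 else n * 10 + d

-- the k+1 big-endian digits of x (with leading zeros), via ediv/emod
def digsBE : Nat → Int → List Int
  | 0, _ => []
  | k + 1, x => x / 10 ^ k :: digsBE k (x % 10 ^ k)

lemma emod_mul_ediv (x p : Int) : (x % (10 * p)) / 10 = (x / 10) % p := by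
  have h1 : x % (10 * p) = x + (-(x / (10 * p) * p)) * 10 := by
    have := Int.emod_add_mul_ediv x (10 * p); ring_nf; ring_nf at this; omega
  rw [h1, Int.add_mul_ediv_right _ _ (by norm_num)]
  have h2 : x / 10 / p = x / (10 * p) := Int.ediv_ediv_of_nonneg (by norm_num)
  have h3 := Int.emod_add_mul_ediv (x / 10) p
  have h4 : p * (x / 10 / p) = x / (10 * p) * p := by rw [h2]; ring
  omega

lemma ediv_pow_succ (x : Int) (k : Nat) : x / 10 ^ (k + 1) = x / 10 / 10 ^ k := by
  rw [pow_succ', Int.ediv_ediv_of_nonneg (by norm_num)]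

lemma emod_pow_succ_ediv (x : Int) (k : Nat) : x % 10 ^ (k + 1) / 10 = x / 10 % 10 ^ k := by
  rw [pow_succ']; exact emod_mul_ediv x _

lemma emod_pow_succ_emod (x : Int) (k : Nat) : x % 10 ^ (k + 1) % 10 = x % 10 := by
  rw [pow_succ', Int.emod_emod_of_dvd _ ⟨10 ^ k, by ring⟩]

lemma digsBE_peel (k : Nat) : ∀ x : Int, 0 ≤ x → x < 10 ^ (k + 1) →
    digsBE (k + 1) x = digsBE k (x / 10) ++ [x % 10] := by
  induction k with
  | zero =>
    intro x hx hlt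
    simp [digsBE]
    omega
  | succ k ih =>
    intro x hx hlt
    have hxm : 0 ≤ x % 10 ^ (k + 1) := Int.emod_nonneg _ (by positivity)
    have hxm2 : x % 10 ^ (k + 1) < 10 ^ (k + 1) := Int.emod_lt_of_pos _ (by positivity)
    have e1 : digsBE (k + 1 + 1) x = x / 10 ^ (k + 1) :: digsBE (k + 1) (x % 10 ^ (k + 1)) := rfl
    have e2 : digsBE (k + 1) (x / 10) = x / 10 / 10 ^ k :: digsBE k (x / 10 % 10 ^ k) := rfl
    rw [e1, ih (x % 10 ^ (k + 1)) hxm hxm2, e2,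
      ediv_pow_succ, emod_pow_succ_ediv, emod_pow_succ_emod]
    simp

lemma pyRange_down (k : Nat) :
    PySem.List.pyRange (k : Int) (-1) (-1) = (List.range (k + 1)).map (fun (j : Nat) => (k : Int) - (j : Int)) := by
  have hc : (((k : Int) - (-1) + -(-1) - 1) / -(-1)).toNat = k + 1 := by
    norm_num
  simp only [PySem.List.pyRange]
  norm_num [hc]
  rw [if_pos (by omega)]
  simp [sub_eq_add_neg]

lemma loopA_eq (k : Nat) : ∀ n x : Int,
    (((List.range (k + 1)).map (fun (j : Nat) => (k : Int) - (j : Int))).foldl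
       (fun (st : Int × Int) i =>
          let number := st.1 * 10 + PySem.Int.floordiv st.2 (10 ^ i.toNat)
          let x' := PySem.Int.mod st.2 (10 ^ i.toNat)
          (if PySem.Int.mod number 2 = 0 then number + 1 else number, x'))
       (n, x)).1 = List.foldl stepA n (digsBE (k + 1) x) := by
  induction k with
  | zero =>
    intro n x
    simp [stepA, digsBE, PySem.Int.floordiv]
  | succ k ih =>
    intro n x
    rw [List.range_succ_eq_map, List.map_cons, List.map_map]
    have hmap : (List.range (k + 1)).map ((fun (j : Nat) => ((k+1 : Nat) : Int) - (j : Int)) ∘ Nat.succ)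
        = (List.range (k + 1)).map (fun (j : Nat) => (k : Int) - (j : Int)) := by
      apply List.map_congr_left
      intro a _
      simp
    rw [List.foldl_cons, hmap]
    simp only [Nat.cast_zero, sub_zero]
    rw [ih]
    have e1 : digsBE (k + 1 + 1) x = x / 10 ^ (k+1) :: digsBE (k + 1) (x % 10 ^ (k+1)) := rfl
    rw [e1, List.foldl_cons]
    simp only [Int.toNat_natCast,
      PySem.Int.floordiv_eq_ediv_of_pos (b := (10:Int) ^ (k+1)) (by positivity),
      PySem.Int.mod_eq_emod_of_pos (b := (10:Int) ^ (k+1)) (by positivity),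
      PySem.Int.mod_eq_emod_of_pos (b := (2:Int)) (by norm_num)]
    simp [stepA]

lemma pvLog10_bounds (n : Nat) (hn : 1 ≤ n) :
    10 ^ pvLog10 n ≤ n ∧ n < 10 ^ (pvLog10 n + 1) := by
  induction n using Nat.strong_induction_on with
  | _ n ih =>
    rw [pvLog10]
    split
    · simpa using ⟨hn, by omega⟩
    · rename_i h
      have hm : 1 ≤ n / 10 := by omega
      obtain ⟨h1, h2⟩ := ih (n / 10) (Nat.div_lt_self (by omega) (by omega)) hm
      constructor
      · calc 10 ^ (pvLog10 (n / 10) + 1) = 10 ^ pvLog10 (n / 10) * 10 := by ring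
          _ ≤ n / 10 * 10 := by omega
          _ ≤ n := by omega
      · calc n < (n / 10 + 1) * 10 := by omega
          _ ≤ 10 ^ (pvLog10 (n / 10) + 1) * 10 := by
              have : n / 10 + 1 ≤ 10 ^ (pvLog10 (n / 10) + 1) := by omega
              exact Nat.mul_le_mul_right 10 this
          _ = 10 ^ (pvLog10 (n / 10) + 1 + 1) := by ring

lemma pvDigits_rev (k : Nat) : ∀ x : Int, 10 ^ k ≤ x → x < 10 ^ (k + 1) →
    (pvDigits x).reverse = digsBE (k + 1) x := by
  induction k with
  | zero =>
    intro x h1 h2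
    rw [pvDigits]
    rw [dif_pos (by simpa using h1 : (0:Int) < x)]
    rw [pvDigits]
    have hd : PySem.Int.floordiv x 10 = 0 := by
      rw [PySem.Int.floordiv_eq_ediv_of_pos (by norm_num)]
      simp at h1 h2
      omega
    rw [dif_neg (by rw [hd]; omega)]
    have hm : PySem.Int.mod x 10 = x := by
      rw [PySem.Int.mod_eq_emod_of_pos (by norm_num)]
      simp at h1 h2
      omega
    simp [digsBE]
    simp at h1 h2
    omega
  | succ k ih =>
    intro x h1 h2
    have hpos : (0:Int) < x := lt_of_lt_of_le (by positivity) h1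
    rw [pvDigits, dif_pos hpos, List.reverse_cons]
    have hq1 : 10 ^ k ≤ PySem.Int.floordiv x 10 := by
      rw [PySem.Int.floordiv_eq_ediv_of_pos (by norm_num), Int.le_ediv_iff_mul_le (by norm_num)]
      calc (10:Int) ^ k * 10 = 10 ^ (k + 1) := by ring
        _ ≤ x := h1
    have hq2 : PySem.Int.floordiv x 10 < 10 ^ (k + 1) := by
      rw [PySem.Int.floordiv_eq_ediv_of_pos (by norm_num), Int.ediv_lt_iff_lt_mul (by norm_num)]
      calc x < 10 ^ (k + 1 + 1) := h2
        _ = 10 ^ (k + 1) * 10 := by ring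
    rw [ih _ hq1 hq2]
    rw [PySem.Int.floordiv_eq_ediv_of_pos (by norm_num), PySem.Int.mod_eq_emod_of_pos (by norm_num)]
    exact (digsBE_peel (k + 1) x (le_of_lt hpos) h2).symm

lemma step_ext : (fun (r d : Int) => r * 10 + d + (1 - PySem.Int.mod d 2)) = stepA := by
  funext r d
  rw [PySem.Int.mod_eq_emod_of_pos (by norm_num)]
  unfold stepA
  split <;> rename_i h <;> omega

-- ===== VERDICT (by name: the statement is the Claim_ definition above) =====
theorem increase_evens_spec : Claim_equal_increase_evens := by
  intro x _ hpre
  unfold Pre_increase_evens at hpre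
  unfold Spec_increase_evens
  have hxnn : (0:Int) ≤ x := by omega
  have hn : 1 ≤ x.toNat := by omega
  obtain ⟨hb1, hb2⟩ := pvLog10_bounds x.toNat hn
  have hxeq : ((x.toNat : Int)) = x := Int.toNat_of_nonneg hxnn
  have hx1 : (10:Int) ^ pvLog10 x.toNat ≤ x := by
    rw [← hxeq]; exact_mod_cast hb1
  have hx2 : x < (10:Int) ^ (pvLog10 x.toNat + 1) := by
    rw [← hxeq]; exact_mod_cast hb2
  unfold increase_evens increase_evens_alt
  dsimp only
  rw [pyRange_down, loopA_eq, pvDigits_rev _ x hx1 hx2, step_ext]
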